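-- pv_equiv track=rewrite | github.com/3b1b/caption_ops | upload.py | add_translation_credit_to_description
-- ===== SOURCE A (Python) =====
-- CREDIT_HEADER = "Thanks to these viewers for their contributions to translations"
--
-- def add_translation_credit_to_description(desc, contributors):
--     lines = desc.split("\n")
--     if any(l.startswith(CREDIT_HEADER) for l in lines):
--         credits_index = next(i for (i, l) in enumerate(lines) if l.startswith(CREDIT_HEADER))
--         while True:
--             if credits_index >= len(lines):
--                 break
--             if len(lines[credits_index].strip()) == 0:
--                 break
--             if lines[credits_index].startswith("-"):
--                 break
--             lines.pop(credits_index)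
--     elif any(l.startswith("--") for l in lines):
--         credits_index = next(i for (i, l) in enumerate(lines) if l.startswith("--"))
--     else:
--         if not len(lines[-1].strip()) == 0:
--             lines.append("")
--         credits_index = len(lines)
--
--     credit_lines = [CREDIT_HEADER]
--     for lang in sorted(contributors.keys()):
--         names = contributors[lang]
--         name_list = ", ".join(names)
--         credit_lines.append(f"{lang.capitalize()}: {name_list}")
--     credit_lines.append("")
--
--     return "\n".join((
--         *lines[:credits_index],
--         *credit_lines,
--         *lines[credits_index:],
--     ))
-- ===== SOURCE B (Python) =====
-- CREDIT_HEADER = "Thanks to these viewers for their contributions to translations"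
--
-- def _make_credit_lines(contributors):
--     return [CREDIT_HEADER] + [
--         f"{lang.capitalize()}: {', '.join(contributors[lang])}"
--         for lang in sorted(contributors)
--     ] + [""]
--
-- def _skip_old_block(lines):
--     # drop lines until a blank line, a '-' line, or the end
--     if not lines:
--         return []
--     if lines[0].strip() == "" or lines[0].startswith("-"):
--         return lines
--     return _skip_old_block(lines[1:])
--
-- def _replace_credits(lines, credit_lines):
--     # replace the old credit block (header line up to blank/'-'/end) by credit_lines
--     if lines[0].startswith(CREDIT_HEADER):
--         return credit_lines + _skip_old_block(lines[1:])
--     return [lines[0]] + _replace_credits(lines[1:], credit_lines)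
--
-- def _insert_before_dashes(lines, credit_lines):
--     # splice credit_lines in just before the first '--' line
--     if lines[0].startswith("--"):
--         return credit_lines + lines
--     return [lines[0]] + _insert_before_dashes(lines[1:], credit_lines)
--
-- def add_translation_credit_to_description(desc, contributors):
--     lines = desc.split("\n")
--     credit_lines = _make_credit_lines(contributors)
--     if any(l.startswith(CREDIT_HEADER) for l in lines):
--         out = _replace_credits(lines, credit_lines)
--     elif any(l.startswith("--") for l in lines):
--         out = _insert_before_dashes(lines, credit_lines)
--     else:
--         if lines[-1].strip() != "":
--             lines = lines + [""]
--         out = lines + credit_lines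
--     return "\n".join(out)
-- ===== Notes on version B (the rewrite author's own statement) =====
-- stated objective: simpler
-- what changed: B rebuilds the line list by structural recursion: a recursive scan replaces the old credit block in place (copy lines until the header, splice the new block, skip old credit lines until blank/'-'/end), a second recursive helper splices before the first '--' line, replacing A's index arithmetic, mutating while-True/pop loop and slice reassembly; credit lines come from a comprehension over sorted keys instead of an accumulator loop.
import Mathlib
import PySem

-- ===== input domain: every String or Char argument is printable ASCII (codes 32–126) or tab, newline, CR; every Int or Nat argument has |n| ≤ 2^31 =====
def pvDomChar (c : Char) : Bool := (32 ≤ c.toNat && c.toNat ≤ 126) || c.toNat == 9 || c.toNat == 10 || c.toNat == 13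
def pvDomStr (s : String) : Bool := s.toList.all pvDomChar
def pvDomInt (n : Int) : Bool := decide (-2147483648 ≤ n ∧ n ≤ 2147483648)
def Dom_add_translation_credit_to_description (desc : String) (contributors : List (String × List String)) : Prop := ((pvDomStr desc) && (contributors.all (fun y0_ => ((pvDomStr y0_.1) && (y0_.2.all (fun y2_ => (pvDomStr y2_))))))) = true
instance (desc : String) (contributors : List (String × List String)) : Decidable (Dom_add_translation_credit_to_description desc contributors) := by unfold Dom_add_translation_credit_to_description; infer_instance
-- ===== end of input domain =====

-- B rebuilds the line list by structural recursion (splice-and-skip helpers) instead of A's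
-- index arithmetic and mutating pop loop (objective: simpler); same return value, no mutation.

-- shared module constant CREDIT_HEADER
def pvHeader : String := "Thanks to these viewers for their contributions to translations"

-- Python str.capitalize(), exact on the ASCII domain: first char uppercased, the rest lowercased
def pvCapitalize (s : String) : String :=
  match s.toList with
  | [] => ""
  | c :: rest => String.ofList (PySem.Chars.upperChar c :: PySem.Chars.lower rest)

-- ===== PORT A =====
-- A's 'while True: … lines.pop(credits_index)' loop; lines.pop(i) with 0 ≤ i < len is eraseIdx i
def pvPopLoop (i : Nat) (lines : List String) : List String :=
  if h : i < lines.length then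
    if PySem.Str.len (PySem.Str.strip lines[i]) == 0 then lines
    else if PySem.Str.startswith lines[i] "-" then lines
    else pvPopLoop i (lines.eraseIdx i)
  else lines
termination_by lines.length
decreasing_by simp [List.length_eraseIdx_of_lt h]; omega

def add_translation_credit_to_description (desc : String) (contributors : List (String × List String)) : String :=
  -- desc.split("\n"): sep ≠ "" so split? is always some
  let lines := (PySem.Str.split? desc "\n").getD []
  let d := PySem.Dict.ofList contributors
  let pr : List String × Nat :=
    if lines.any (fun l => PySem.Str.startswith l pvHeader) then
      let ci := lines.findIdx (fun l => PySem.Str.startswith l pvHeader)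
      (pvPopLoop ci lines, ci)
    else if lines.any (fun l => PySem.Str.startswith l "--") then
      (lines, lines.findIdx (fun l => PySem.Str.startswith l "--"))
    else
      -- lines[-1]: split's result is nonempty, so pyGet? is always some (getD "" never fires)
      let lines := if !(PySem.Str.len (PySem.Str.strip ((PySem.List.pyGet? lines (-1)).getD "")) == 0)
                   then lines ++ [""] else lines
      (lines, lines.length)
  -- contributors[lang] with lang ∈ keys: getD [] never falls back
  let credit_lines := (PySem.List.sorted d.keys (fun x => x) false).foldl
      (fun acc lang => acc ++ [pvCapitalize lang ++ ": " ++ PySem.Str.join ", " (d.getD lang [])])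
      [pvHeader]
  let credit_lines := credit_lines ++ [""]
  PySem.Str.join "\n" (pr.1.take pr.2 ++ credit_lines ++ pr.1.drop pr.2)

-- ===== PORT B =====
-- B's _skip_old_block: drop lines until a blank line, a '-' line, or the end
def pvSkipOldBlock : List String → List String
  | [] => []
  | l :: rest =>
    if PySem.Str.strip l == "" || PySem.Str.startswith l "-" then l :: rest
    else pvSkipOldBlock rest

-- B's _replace_credits (Python indexes lines[0]: called only when a header line exists,
-- so the [] case is unreachable)
def pvReplaceCredits (cl : List String) : List String → List String
  | [] => []
  | l :: rest =>
    if PySem.Str.startswith l pvHeader then cl ++ pvSkipOldBlock rest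
    else l :: pvReplaceCredits cl rest

-- B's _insert_before_dashes (likewise called only when a '--' line exists)
def pvInsertBeforeDashes (cl : List String) : List String → List String
  | [] => []
  | l :: rest =>
    if PySem.Str.startswith l "--" then cl ++ l :: rest
    else l :: pvInsertBeforeDashes cl rest

def add_translation_credit_to_description_alt (desc : String) (contributors : List (String × List String)) : String :=
  let lines := (PySem.Str.split? desc "\n").getD []
  let d := PySem.Dict.ofList contributors
  -- B's _make_credit_lines: header, one line per sorted language, trailing blank
  let cl := pvHeader ::
      ((PySem.List.sorted d.keys (fun x => x) false).map
        (fun lang => pvCapitalize lang ++ ": " ++ PySem.Str.join ", " (d.getD lang [])) ++ [""])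
  let out :=
    if lines.any (fun l => PySem.Str.startswith l pvHeader) then
      pvReplaceCredits cl lines
    else if lines.any (fun l => PySem.Str.startswith l "--") then
      pvInsertBeforeDashes cl lines
    else
      let lines := if !(PySem.Str.strip ((PySem.List.pyGet? lines (-1)).getD "") == "")
                   then lines ++ [""] else lines
      lines ++ cl
  PySem.Str.join "\n" out

-- ===== PRECONDITION & SPEC =====
def Spec_add_translation_credit_to_description (desc : String) (contributors : List (String × List String)) (out : String) : Prop := out = add_translation_credit_to_description_alt desc contributors
instance (desc : String) (contributors : List (String × List String)) (out : String) : Decidable (Spec_add_translation_credit_to_description desc contributors out) := by unfold Spec_add_translation_credit_to_description; infer_instance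

-- ===== CLAIM (what is proved, stated in full; the proofs are below) =====
def Claim_equal_add_translation_credit_to_description : Prop := ∀ (desc : String) (contributors : List (String × List String)), Dom_add_translation_credit_to_description desc contributors → Spec_add_translation_credit_to_description desc contributors (add_translation_credit_to_description desc contributors)

-- ===== LEMMAS AND PROOFS =====

-- A's break test 'len(l.strip()) == 0' and B's 'l.strip() == ""' agree
theorem pvBlank_eq (l : String) :
    (PySem.Str.len (PySem.Str.strip l) == 0) = (PySem.Str.strip l == "") := by
  rcases h : PySem.Str.strip l with ⟨cs⟩
  cases cs
  all_goals simp [PySem.Str.len]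

-- the predicate both removal scans walk over: "neither blank nor a dash line"
def pvGo (l : String) : Bool := !(PySem.Str.strip l == "") && !(PySem.Str.startswith l "-")

-- head of a dropWhile result falsifies the predicate
theorem pvHeadDropWhile {a : Type} (p : a → Bool) : ∀ (l : List a) (c : a) (cs : List a),
    l.dropWhile p = c :: cs → p c = false := by
  intro l
  induction l with
  | nil => intro c cs h; simp at h
  | cons x t ih =>
    intro c cs h
    rw [List.dropWhile_cons] at h
    by_cases hp : p x = true
    · rw [if_pos hp] at h; exact ih _ _ h
    · rw [if_neg hp] at h
      cases h
      cases hx : p x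
      · rfl
      · exact absurd hx hp

-- a line that startswith the credit header is neither blank nor a dash line
theorem pvGo_of_header (l : String) (h : PySem.Str.startswith l pvHeader = true) :
    pvGo l = true := by
  have hpre : pvHeader.toList <+: l.toList :=
    (PySem.Chars.startswith_iff (s := l.toList) (p := pvHeader.toList)).mp (by simpa using h)
  obtain ⟨t, ht⟩ := hpre
  have hlist : l.toList = 'T' :: ("hanks to these viewers for their contributions to translations".toList ++ t) := by
    rw [← ht]; rfl
  have hdash : PySem.Str.startswith l "-" = false := by
    by_contra hc
    have hc' : PySem.Chars.startswith l.toList ['-'] = true := by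
      cases hx : PySem.Str.startswith l "-"
      · exact absurd hx hc
      · simpa using hx
    obtain ⟨u, hu⟩ := (PySem.Chars.startswith_iff (s := l.toList) (p := ['-'])).mp hc'
    rw [hlist] at hu
    simp at hu
  have hblank : (PySem.Str.strip l == "") = false := by
    by_contra hc
    have hc' : PySem.Str.strip l = "" := by
      cases hs : (PySem.Str.strip l == "") with
      | false => exact absurd hs hc
      | true => exact eq_of_beq hs
    have hnil : PySem.Chars.strip l.toList = [] := by
      have := congrArg String.toList hc'
      simpa using this
    -- strip = rstrip (lstrip _): reversing, the lstrip result is all-whitespace …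
    have hall : ∀ y, y ∈ (PySem.Chars.lstrip l.toList).reverse → PySem.Chars.isspace y = true := by
      have hrev : (PySem.Chars.lstrip l.toList).reverse.dropWhile PySem.Chars.isspace = [] := by
        have := congrArg List.reverse hnil
        simpa [PySem.Chars.strip, PySem.Chars.rstrip] using this
      exact fun y hy => List.dropWhile_eq_nil_iff.mp hrev y hy
    -- … but its head is non-whitespace, so it is empty and l is all-whitespace: contradicts the 'T'
    cases hlp : PySem.Chars.lstrip l.toList with
    | nil =>
      have hws : ∀ x, x ∈ l.toList → PySem.Chars.isspace x = true :=
        fun x hx => List.dropWhile_eq_nil_iff.mp (by simpa [PySem.Chars.lstrip] using hlp) x hx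
      have hT := hws 'T' (by rw [hlist]; exact List.mem_cons_self)
      simp [PySem.Chars.isspace] at hT
    | cons c cs =>
      have hc1 : PySem.Chars.isspace c = true :=
        hall c (List.mem_reverse.mpr (by rw [hlp]; exact List.mem_cons_self))
      have hc0 : PySem.Chars.isspace c = false :=
        pvHeadDropWhile PySem.Chars.isspace l.toList c cs (by simpa [PySem.Chars.lstrip] using hlp)
      rw [hc1] at hc0
      exact absurd hc0 (by simp)
  simp only [pvGo, hblank, hdash, Bool.not_false, Bool.and_self]

-- B's skip helper is dropWhile pvGo
theorem pvSkipOldBlock_eq (L : List String) : pvSkipOldBlock L = L.dropWhile pvGo := by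
  induction L with
  | nil => rfl
  | cons l rest ih =>
    rw [pvSkipOldBlock, List.dropWhile_cons]
    by_cases h1 : (PySem.Str.strip l == "") = true
    · have hgo : pvGo l = false := by simp only [pvGo, h1, Bool.not_true, Bool.false_and]
      rw [if_pos (by rw [h1]; rfl), if_neg (by simp [hgo])]
    · have h1' : (PySem.Str.strip l == "") = false := by
        cases hx : (PySem.Str.strip l == "")
        · rfl
        · exact absurd hx h1
      by_cases h2 : PySem.Str.startswith l "-" = true
      · have hgo : pvGo l = false := by simp only [pvGo, h2, Bool.not_true, Bool.and_false]
        rw [if_pos (by rw [h1', h2]; rfl), if_neg (by simp [hgo])]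
      · have h2' : PySem.Str.startswith l "-" = false := by
          cases hx : PySem.Str.startswith l "-"
          · rfl
          · exact absurd hx h2
        have hgo : pvGo l = true := by simp only [pvGo, h1', h2', Bool.not_false, Bool.and_self]
        rw [if_neg (by rw [h1', h2']; simp), if_pos hgo, ih]

-- B's replace helper, expressed by the header's first index
theorem pvReplaceCredits_eq (cl : List String) : ∀ (L : List String) (idx : Nat),
    L.findIdx? (fun l => PySem.Str.startswith l pvHeader) = some idx →
    pvReplaceCredits cl L = L.take idx ++ cl ++ (L.drop (idx + 1)).dropWhile pvGo := by
  intro L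
  induction L with
  | nil => intro idx h; simp at h
  | cons l rest ih =>
    intro idx h
    rw [List.findIdx?_cons] at h
    by_cases hl : PySem.Str.startswith l pvHeader = true
    · rw [if_pos hl] at h
      injection h with h0
      rw [pvReplaceCredits, if_pos hl, ← h0]
      simp [pvSkipOldBlock_eq]
    · have hl' : (PySem.Str.startswith l pvHeader) = false := by cases hx : PySem.Str.startswith l pvHeader <;> simp_all
      rw [hl', if_neg (by simp)] at h
      cases hrest : rest.findIdx? (fun l => PySem.Str.startswith l pvHeader) with
      | none => rw [hrest] at h; simp at h
      | some j =>
        rw [hrest] at h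
        simp only [Option.map_some] at h
        injection h with h0
        rw [pvReplaceCredits, if_neg hl, ih j hrest, ← h0]
        simp
-- B's dash helper, expressed by the first '--' index
theorem pvInsertBeforeDashes_eq (cl : List String) : ∀ (L : List String) (j : Nat),
    L.findIdx? (fun l => PySem.Str.startswith l "--") = some j →
    pvInsertBeforeDashes cl L = L.take j ++ cl ++ L.drop j := by
  intro L
  induction L with
  | nil => intro j h; simp at h
  | cons l rest ih =>
    intro j h
    rw [List.findIdx?_cons] at h
    by_cases hl : PySem.Str.startswith l "--" = true
    · rw [if_pos hl] at h
      injection h with h0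
      rw [pvInsertBeforeDashes, if_pos hl, ← h0]
      simp
    · have hl' : (PySem.Str.startswith l "--") = false := by cases hx : PySem.Str.startswith l "--" <;> simp_all
      rw [hl', if_neg (by simp)] at h
      cases hrest : rest.findIdx? (fun l => PySem.Str.startswith l "--") with
      | none => rw [hrest] at h; simp at h
      | some k =>
        rw [hrest] at h
        simp only [Option.map_some] at h
        injection h with h0
        rw [pvInsertBeforeDashes, if_neg hl, ih k hrest, ← h0]
        simp

theorem pvPopLoop_eq : ∀ (n : Nat) (L : List String) (i : Nat), L.length - i = n →
    i ≤ L.length → pvPopLoop i L = L.take i ++ (L.drop i).dropWhile pvGo := by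
  intro n
  induction n with
  | zero =>
    intro L i hn hle
    have hi : i = L.length := by omega
    rw [pvPopLoop]
    simp [hi, List.drop_eq_nil_of_le (le_refl L.length)]
  | succ n ih =>
    intro L i hn hle
    have hi : i < L.length := by omega
    rw [pvPopLoop, dif_pos hi, List.drop_eq_getElem_cons hi, List.dropWhile_cons]
    by_cases hb : (PySem.Str.strip L[i] == "") = true
    · have hgo : pvGo L[i] = false := by
        simp only [pvGo, hb, Bool.not_true, Bool.false_and]
      simp only [pvBlank_eq, hb, if_true, hgo, Bool.false_eq_true, if_false,
        ← List.drop_eq_getElem_cons hi, List.take_append_drop]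
    · have hb0 : (PySem.Str.strip L[i] == "") = false := by simpa using hb
      by_cases hd : PySem.Str.startswith L[i] "-" = true
      · have hgo : pvGo L[i] = false := by
          simp only [pvGo, hd, Bool.not_true, Bool.and_false]
        simp only [pvBlank_eq, hb0, Bool.false_eq_true, if_false, hd, if_true, hgo,
          ← List.drop_eq_getElem_cons hi, List.take_append_drop]
      · have hd0 : PySem.Str.startswith L[i] "-" = false := by simpa using hd
        have hgo : pvGo L[i] = true := by
          simp only [pvGo, hb0, hd0, Bool.not_false, Bool.and_self]
        simp only [pvBlank_eq, hb0, hd0, Bool.false_eq_true, if_false, hgo, if_true]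
        rw [ih (L.eraseIdx i) i (by rw [List.length_eraseIdx_of_lt hi]; omega)
              (by rw [List.length_eraseIdx_of_lt hi]; omega)]
        have htl : (L.take i).length = i := by simp; omega
        rw [List.eraseIdx_eq_take_drop_succ, List.take_left' htl, List.drop_left' htl]

theorem take_popLoop (L : List String) (i : Nat) (h : i ≤ L.length) :
    (pvPopLoop i L).take i = L.take i := by
  rw [pvPopLoop_eq (L.length - i) L i rfl h, List.take_left' (by simp; omega)]

theorem drop_popLoop (L : List String) (i : Nat) (h : i ≤ L.length) :
    (pvPopLoop i L).drop i = (L.drop i).dropWhile pvGo := by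
  rw [pvPopLoop_eq (L.length - i) L i rfl h, List.drop_left' (by simp; omega)]

-- ===== VERDICT (by name: the statement is the Claim_ definition above) =====
theorem add_translation_credit_to_description_spec : Claim_equal_add_translation_credit_to_description := by
  intro desc contributors _
  unfold Spec_add_translation_credit_to_description
  unfold add_translation_credit_to_description add_translation_credit_to_description_alt
  dsimp only
  set L := (PySem.Str.split? desc "\n").getD [] with hL
  set d := PySem.Dict.ofList contributors with hd
  simp only [PySem.List.foldl_append_singleton_eq_map]
  cases hH : L.findIdx? (fun l => PySem.Str.startswith l pvHeader) with
  | some idx =>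
    have hany : L.any (fun l => PySem.Str.startswith l pvHeader) = true := by
      rw [← List.findIdx?_isSome, hH]; rfl
    have hidx : L.findIdx (fun l => PySem.Str.startswith l pvHeader) = idx := by
      rw [List.findIdx_eq_getD_findIdx?, hH]; rfl
    have hlt : idx < L.length := by
      have := List.findIdx_lt_length_of_exists (p := fun l => PySem.Str.startswith l pvHeader)
        (xs := L) (by simpa [List.any_eq_true] using hany)
      omega
    have hhead : PySem.Str.startswith L[idx] pvHeader = true := by
      have hget := List.findIdx_getElem (w := hidx ▸ hlt) (xs := L)
        (p := fun l => PySem.Str.startswith l pvHeader)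
      simp only [hidx] at hget
      exact hget
    simp only [hany, if_true, hidx]
    rw [take_popLoop L idx (by omega), drop_popLoop L idx (by omega),
        pvReplaceCredits_eq _ L idx hH,
        List.drop_eq_getElem_cons hlt, List.dropWhile_cons, if_pos (pvGo_of_header _ hhead)]
    simp
  | none =>
    have hany : L.any (fun l => PySem.Str.startswith l pvHeader) = false := by
      rw [← List.findIdx?_isSome, hH]; rfl
    simp only [hany, Bool.false_eq_true, if_false]
    cases hD : L.findIdx? (fun l => PySem.Str.startswith l "--") with
    | some j =>
      have hany2 : L.any (fun l => PySem.Str.startswith l "--") = true := by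
        rw [← List.findIdx?_isSome, hD]; rfl
      have hj : L.findIdx (fun l => PySem.Str.startswith l "--") = j := by
        rw [List.findIdx_eq_getD_findIdx?, hD]; rfl
      simp only [hany2, if_true, hj]
      rw [pvInsertBeforeDashes_eq _ L j hD]
      simp
    | none =>
      have hany2 : L.any (fun l => PySem.Str.startswith l "--") = false := by
        rw [← List.findIdx?_isSome, hD]; rfl
      simp only [hany2, Bool.false_eq_true, if_false]
      by_cases hb : (PySem.Str.strip ((PySem.List.pyGet? L (-1)).getD "") == "") = true
      · simp only [pvBlank_eq, hb, Bool.not_true, Bool.false_eq_true, if_false]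
        simp
      · have hb0 : (PySem.Str.strip ((PySem.List.pyGet? L (-1)).getD "") == "") = false := by
          simpa using hb
        simp only [pvBlank_eq, hb0, Bool.not_false, if_true]
        rw [List.take_length, List.drop_length]
        simp
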